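-- pv_equiv track=rewrite | github.com/vivek-chandan/The-Compliance-Clerk | src/exporter.py | _dedupe_rows_by_master_key
-- ===== SOURCE A (Python) =====
-- from typing import Any, Dict, Iterable, Union
--
-- def _dedupe_rows_by_master_key(rows: list[Dict[str, Any]]) -> list[Dict[str, Any]]:
--     best_rows: Dict[str, Dict[str, Any]] = {}
--     passthrough: list[Dict[str, Any]] = []
--
--     for row in rows:
--         master_key = str(row.get("Master Key", "") or "").strip()
--         if not master_key:
--             passthrough.append(row)
--             continue
--         existing = best_rows.get(master_key)
--         if existing is None or _row_score(row) > _row_score(existing):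
--             best_rows[master_key] = row
--
--     return list(best_rows.values()) + passthrough
--
-- def _row_score(row: Dict[str, Any]) -> tuple[int, int]:
--     values = [
--         str(value or "").strip()
--         for key, value in row.items()
--         if key not in {"sr no", "Document Type", "Source Files", "Master Key"}
--     ]
--     filled_count = sum(1 for value in values if value)
--     total_length = sum(len(value) for value in values)
--     return filled_count, total_length
-- ===== SOURCE B (Python) =====
-- from typing import Any, Dict
--
-- def _row_score(row: Dict[str, Any]) -> tuple[int, int]:
--     values = [
--         str(value or "").strip()
--         for key, value in row.items()
--         if key not in {"sr no", "Document Type", "Source Files", "Master Key"}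
--     ]
--     filled_count = sum(1 for value in values if value)
--     total_length = sum(len(value) for value in values)
--     return filled_count, total_length
--
-- def _dedupe_rows_by_master_key(rows: list[Dict[str, Any]]) -> list[Dict[str, Any]]:
--     groups: Dict[str, list[Dict[str, Any]]] = {}
--     passthrough: list[Dict[str, Any]] = []
--     for row in rows:
--         master_key = str(row.get("Master Key", "") or "").strip()
--         if master_key:
--             groups.setdefault(master_key, []).append(row)
--         else:
--             passthrough.append(row)
--     return [max(group, key=_row_score) for group in groups.values()] + passthrough
-- ===== Notes on version B (the rewrite author's own statement) =====
-- stated objective: alternative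
-- what changed: Instead of maintaining a running best row per key inside the loop, B groups all rows per master key in one pass (dict of lists plus a passthrough list) and then reduces each group with max(key=_row_score), relying on max keeping the first maximal element to match A's strict-> tie-breaking.
import Mathlib
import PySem

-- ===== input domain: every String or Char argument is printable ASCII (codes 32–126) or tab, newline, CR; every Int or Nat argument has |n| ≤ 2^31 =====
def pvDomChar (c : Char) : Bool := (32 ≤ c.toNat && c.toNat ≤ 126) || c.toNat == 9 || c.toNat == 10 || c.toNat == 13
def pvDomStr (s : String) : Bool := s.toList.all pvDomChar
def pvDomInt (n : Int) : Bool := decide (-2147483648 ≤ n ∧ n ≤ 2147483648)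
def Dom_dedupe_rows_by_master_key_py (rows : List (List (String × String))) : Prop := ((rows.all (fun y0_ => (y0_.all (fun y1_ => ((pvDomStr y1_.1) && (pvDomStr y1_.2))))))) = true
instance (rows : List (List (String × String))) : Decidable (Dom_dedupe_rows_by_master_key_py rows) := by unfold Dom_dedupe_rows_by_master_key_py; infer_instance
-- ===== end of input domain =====

-- B groups rows per master key in one pass and reduces each group with max(key=_row_score)
-- instead of A's running best-per-key; same results, proved equal on all inputs.

-- ===== PORT A =====

-- _row_score, shared verbatim by the two Pythons (B keeps it unchanged)
def row_score (row : List (String × String)) : Int × Int :=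
  let values := (row.filter
      (fun p => !(["sr no", "Document Type", "Source Files", "Master Key"].contains p.1))).map
      (fun p => PySem.Str.strip p.2)
  (((values.filter (fun v => v ≠ "")).length : Int), (values.map (fun v => PySem.Str.len v)).sum)

-- Python tuple comparison '>' on (int, int)
def scoreGt (a b : Int × Int) : Bool := a.1 > b.1 || (a.1 == b.1 && a.2 > b.2)

-- str(row.get("Master Key", "") or "").strip()  ('x or ""' and str() are identities on str)
def masterKey (row : List (String × String)) : String :=
  PySem.Str.strip ((PySem.Dict.mk row).getD "Master Key" "")

def stepA (st : PySem.Dict String (List (String × String)) × List (List (String × String)))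
    (row : List (String × String)) :
    PySem.Dict String (List (String × String)) × List (List (String × String)) :=
  let mk := masterKey row
  if mk = "" then (st.1, st.2 ++ [row])
  else
    match st.1.get? mk with
    | none => (st.1.insert mk row, st.2)
    | some existing =>
        if scoreGt (row_score row) (row_score existing) then (st.1.insert mk row, st.2) else st

def dedupe_rows_by_master_key_py (rows : List (List (String × String))) :
    List (List (String × String)) :=
  let st := rows.foldl stepA (PySem.Dict.empty, [])
  st.1.values ++ st.2

-- ===== PORT B =====

-- max(group, key=_row_score): first maximal element (strict '>' replaces)
def maxByScore : List (List (String × String)) → List (String × String)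
  | [] => []
  | h :: t => t.foldl (fun best r => if scoreGt (row_score r) (row_score best) then r else best) h

def stepB (st : PySem.Dict String (List (List (String × String))) × List (List (String × String)))
    (row : List (String × String)) :
    PySem.Dict String (List (List (String × String))) × List (List (String × String)) :=
  let mk := masterKey row
  if mk = "" then (st.1, st.2 ++ [row])
  else (st.1.modify mk [] (fun g => g ++ [row]), st.2)

def dedupe_rows_by_master_key_py_alt (rows : List (List (String × String))) :
    List (List (String × String)) :=
  let st := rows.foldl stepB (PySem.Dict.empty, [])
  (st.1.values.map maxByScore) ++ st.2

-- ===== PRECONDITION & SPEC =====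
def Spec_dedupe_rows_by_master_key_py (rows : List (List (String × String))) (out : List (List (String × String))) : Prop := out = dedupe_rows_by_master_key_py_alt rows
instance (rows : List (List (String × String))) (out : List (List (String × String))) : Decidable (Spec_dedupe_rows_by_master_key_py rows out) := by unfold Spec_dedupe_rows_by_master_key_py; infer_instance

-- ===== CLAIM (what is proved, stated in full; the proofs are below) =====
def Claim_equal_dedupe_rows_by_master_key_py : Prop := ∀ (rows : List (List (String × String))), Dom_dedupe_rows_by_master_key_py rows → Spec_dedupe_rows_by_master_key_py rows (dedupe_rows_by_master_key_py rows)

-- ===== LEMMAS AND PROOFS =====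

-- Invariant tying A's running best dict to B's group dict
def PairInv (bd : PySem.Dict String (List (String × String)))
    (gd : PySem.Dict String (List (List (String × String)))) : Prop :=
  bd.keys = gd.keys ∧ bd.keys.Nodup ∧
  ∀ k ∈ gd.keys, gd.getD k [] ≠ [] ∧ bd.get? k = some (maxByScore (gd.getD k []))

lemma maxByScore_append (g : List (List (String × String))) (r : List (String × String))
    (hg : g ≠ []) :
    maxByScore (g ++ [r]) =
      if scoreGt (row_score r) (row_score (maxByScore g)) then r else maxByScore g := by
  cases g with
  | nil => exact absurd rfl hg
  | cons h t => simp [maxByScore, List.foldl_append]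

lemma stepA_snd (st : PySem.Dict String (List (String × String)) × List (List (String × String)))
    (row : List (String × String)) (h : masterKey row ≠ "") : (stepA st row).2 = st.2 := by
  simp only [stepA]
  rw [if_neg h]
  cases st.1.get? (masterKey row)
  · rfl
  · simp only []
    split <;> rfl

lemma stepB_snd (st : PySem.Dict String (List (List (String × String))) × List (List (String × String)))
    (row : List (String × String)) (h : masterKey row ≠ "") : (stepB st row).2 = st.2 := by
  simp only [stepB]
  rw [if_neg h]

lemma inv_step (bd : PySem.Dict String (List (String × String)))
    (gd : PySem.Dict String (List (List (String × String))))
    (row : List (String × String)) (p q : List (List (String × String)))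
    (hinv : PairInv bd gd) (hmk : masterKey row ≠ "") :
    PairInv (stepA (bd, p) row).1 (stepB (gd, q) row).1 := by
  obtain ⟨hkeys, hnd, hpt⟩ := hinv
  simp only [stepA, stepB]
  rw [if_neg hmk, if_neg hmk]
  cases h : bd.get? (masterKey row) with
  | none =>
    dsimp only
    have hnmem : masterKey row ∉ bd.keys :=
      (PySem.Dict.get?_eq_none_iff_not_mem_keys bd (masterKey row)).mp h
    have hcb : bd.contains (masterKey row) = false :=
      Bool.eq_false_iff.mpr (fun hc => hnmem ((PySem.Dict.contains_iff_mem_keys bd _).mp hc))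
    have hcg : gd.contains (masterKey row) = false :=
      Bool.eq_false_iff.mpr (fun hc => hnmem (hkeys ▸ (PySem.Dict.contains_iff_mem_keys gd _).mp hc))
    have hkb : (bd.insert (masterKey row) row).keys = bd.keys ++ [masterKey row] :=
      PySem.Dict.keys_insert_of_not_contains bd row hcb
    have hkg : (gd.modify (masterKey row) [] (fun g => g ++ [row])).keys
        = gd.keys ++ [masterKey row] := by
      rw [PySem.Dict.keys_modify, PySem.Dict.keys_insert_of_not_contains _ _ hcg]
    refine ⟨by rw [hkb, hkg, hkeys], ?_, ?_⟩
    · rw [hkb]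
      refine List.Nodup.append hnd (List.nodup_singleton _) ?_
      intro a ha hb
      exact hnmem ((List.mem_singleton.mp hb) ▸ ha)
    · intro k hk
      rw [hkg] at hk
      rcases List.mem_append.mp hk with hk | hk
      · have hne : k ≠ masterKey row := fun he => hnmem (hkeys ▸ he ▸ hk)
        rw [PySem.Dict.getD_modify, if_neg hne, PySem.Dict.get?_insert, if_neg hne]
        exact hpt k hk
      · have he : k = masterKey row := by simpa using hk
        subst he
        rw [PySem.Dict.getD_modify, if_pos rfl, PySem.Dict.getD_of_not_contains gd [] hcg,
          PySem.Dict.get?_insert, if_pos rfl]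
        exact ⟨by simp, by simp [maxByScore]⟩
  | some existing =>
    dsimp only
    have hmem : masterKey row ∈ bd.keys := by
      by_contra hn
      rw [← PySem.Dict.get?_eq_none_iff_not_mem_keys] at hn
      simp [h] at hn
    have hmemg : masterKey row ∈ gd.keys := hkeys ▸ hmem
    obtain ⟨hgne, hget⟩ := hpt (masterKey row) hmemg
    have hex : existing = maxByScore (gd.getD (masterKey row) []) := by
      rw [h] at hget
      exact Option.some.inj hget
    have hcg : gd.contains (masterKey row) = true :=
      (PySem.Dict.contains_iff_mem_keys gd _).mpr hmemg
    have hkg : (gd.modify (masterKey row) [] (fun g => g ++ [row])).keys = gd.keys := by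
      rw [PySem.Dict.keys_modify, PySem.Dict.keys_insert_of_contains _ _ hcg]
    have hcb : bd.contains (masterKey row) = true :=
      (PySem.Dict.contains_iff_mem_keys bd _).mpr hmem
    have hptw : ∀ k ∈ gd.keys,
        (gd.modify (masterKey row) [] (fun g => g ++ [row])).getD k [] ≠ [] ∧
        (if scoreGt (row_score row) (row_score existing) then bd.insert (masterKey row) row
          else bd).get? k
          = some (maxByScore ((gd.modify (masterKey row) [] (fun g => g ++ [row])).getD k [])) := by
      intro k hk
      rw [PySem.Dict.getD_modify]
      by_cases hke : k = masterKey row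
      · subst hke
        rw [if_pos rfl, maxByScore_append _ _ hgne, ← hex]
        constructor
        · simp
        · split
          · rw [PySem.Dict.get?_insert, if_pos rfl]
          · rw [h, hex]
      · rw [if_neg hke]
        refine ⟨(hpt k hk).1, ?_⟩
        split
        · rw [PySem.Dict.get?_insert, if_neg hke]
          exact (hpt k hk).2
        · exact (hpt k hk).2
    by_cases hsc : scoreGt (row_score row) (row_score existing) = true
    · rw [if_pos hsc]
      exact ⟨by rw [PySem.Dict.keys_insert_of_contains bd row hcb, hkg, hkeys], by
        rw [PySem.Dict.keys_insert_of_contains bd row hcb]; exact hnd, by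
        intro k hk; rw [hkg] at hk
        have h2 := hptw k hk
        rw [if_pos hsc] at h2
        exact h2⟩
    · rw [if_neg hsc]
      exact ⟨by rw [hkg, hkeys], hnd, by
        intro k hk; rw [hkg] at hk
        have h2 := hptw k hk
        rw [if_neg hsc] at h2
        exact h2⟩

lemma fold_inv : ∀ (rows : List (List (String × String)))
    (bd : PySem.Dict String (List (String × String)))
    (gd : PySem.Dict String (List (List (String × String))))
    (p : List (List (String × String))), PairInv bd gd →
    PairInv (rows.foldl stepA (bd, p)).1 (rows.foldl stepB (gd, p)).1 ∧
      (rows.foldl stepA (bd, p)).2 = (rows.foldl stepB (gd, p)).2 := by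
  intro rows
  induction rows with
  | nil => intro bd gd p hinv; exact ⟨hinv, rfl⟩
  | cons r t ih =>
    intro bd gd p hinv
    simp only [List.foldl_cons]
    by_cases hmk : masterKey r = ""
    · have ha : stepA (bd, p) r = (bd, p ++ [r]) := by simp [stepA, hmk]
      have hb : stepB (gd, p) r = (gd, p ++ [r]) := by simp [stepB, hmk]
      rw [ha, hb]
      exact ih bd gd (p ++ [r]) hinv
    · have ha : stepA (bd, p) r = ((stepA (bd, p) r).1, p) :=
        Prod.ext rfl (stepA_snd (bd, p) r hmk)
      have hb : stepB (gd, p) r = ((stepB (gd, p) r).1, p) :=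
        Prod.ext rfl (stepB_snd (gd, p) r hmk)
      rw [ha, hb]
      exact ih _ _ p (inv_step bd gd r p p hinv hmk)

-- ===== VERDICT (by name: the statement is the Claim_ definition above) =====
theorem dedupe_rows_by_master_key_py_spec : Claim_equal_dedupe_rows_by_master_key_py := by
  intro rows _
  unfold Spec_dedupe_rows_by_master_key_py
  unfold dedupe_rows_by_master_key_py dedupe_rows_by_master_key_py_alt
  obtain ⟨⟨hkeys, hnd, hpt⟩, hp⟩ := fold_inv rows PySem.Dict.empty PySem.Dict.empty []
    ⟨by rw [PySem.Dict.keys_empty, PySem.Dict.keys_empty], by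
      rw [PySem.Dict.keys_empty]; exact List.nodup_nil, by
      rw [PySem.Dict.keys_empty]; intro k hk; exact absurd hk (List.not_mem_nil)⟩
  dsimp only
  rw [hp]
  congr 1
  rw [PySem.Dict.values_eq_map_keys _ hnd [],
    PySem.Dict.values_eq_map_keys _ (hkeys ▸ hnd) [], List.map_map, hkeys]
  refine List.map_congr_left ?_
  intro k hk
  obtain ⟨_, hget⟩ := hpt k hk
  simp only [Function.comp]
  rw [PySem.Dict.getD_eq_get?_getD, hget]
  rfl
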